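-- pv_equiv track=rewrite | github.com/choyeongwook/Algorithm | Programmers/Lv2/프로세스.py | solution
-- ===== SOURCE A (Python) =====
-- from collections import deque
--
-- def solution(priorities, location):
--     sorted_array = sorted(priorities)
--
--     queue = deque(priorities)
--
--     result = 0
--     while True:
--         current = queue.popleft()
--
--         # current가 현재 큐에서 가장 큰 proirity 이면
--         if current == sorted_array[-1]:
--             result += 1
--             if location == 0:
--                 break
--             else:
--                 sorted_array.pop()
--                 location -= 1
--         else:
--             queue.append(current)
--             if location == 0:
--                 location = len(queue)-1
--             else:
--                 location -= 1
--
--     return result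
-- ===== SOURCE B (Python) =====
-- from collections import deque
--
-- def solution(priorities, location):
--     queue = deque(enumerate(priorities))
--     count = 0
--     while True:
--         idx, prio = queue.popleft()
--         if any(p > prio for _, p in queue):
--             queue.append((idx, prio))
--         else:
--             count += 1
--             if idx == location:
--                 return count
-- ===== Notes on version B (the rewrite author's own statement) =====
-- stated objective: idiomatic
-- what changed: B drops A's sorted side-array and wrap-around location-pointer arithmetic: it queues (index, priority) pairs via deque(enumerate(...)), tests the popped front against the live queue with any(), and returns when the executed entry's own index equals location.
-- outside the precondition, e.g. on solution([-1, -1, 0], 3): A returns 2, B raises IndexError; on solution([], 0): A raises IndexError, B raises IndexError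
import Mathlib
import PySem

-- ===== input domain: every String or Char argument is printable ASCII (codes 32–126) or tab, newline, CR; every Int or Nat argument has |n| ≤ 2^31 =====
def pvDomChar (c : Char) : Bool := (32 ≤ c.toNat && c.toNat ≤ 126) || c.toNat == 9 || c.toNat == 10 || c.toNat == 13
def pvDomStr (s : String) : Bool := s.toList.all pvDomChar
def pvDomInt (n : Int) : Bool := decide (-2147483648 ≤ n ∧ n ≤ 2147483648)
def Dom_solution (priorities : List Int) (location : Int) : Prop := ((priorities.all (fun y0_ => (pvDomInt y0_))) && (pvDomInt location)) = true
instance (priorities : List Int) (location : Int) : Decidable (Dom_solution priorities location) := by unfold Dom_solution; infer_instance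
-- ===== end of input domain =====

-- B replaces A's sorted side-array and location-pointer arithmetic by an index-tagged queue
-- (deque(enumerate(priorities))) with the front compared against the live queue (objective: idiomatic).

-- ===== PORT A =====
-- A's 'while True' loop, with fuel (on fuel exhaustion the current result is returned;
-- unreachable under Pre_ with the generous fuel solution passes)
def solLoopA (fuel : Nat) (sa q : List Int) (loc res : Int) : Int :=
  match fuel with
  | 0 => res
  | f + 1 =>
    match q with
    | [] => res                          -- queue.popleft() on empty deque: Python raises (outside Pre_)
    | c :: rest =>
      match PySem.List.pyGet? sa (-1) with
      | none => res                      -- sorted_array[-1] on empty list: Python raises (outside Pre_)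
      | some m =>
        if c = m then
          if loc = 0 then res + 1
          else solLoopA f sa.dropLast rest (loc - 1) (res + 1)
        else
          if loc = 0 then solLoopA f sa (rest ++ [c]) (((rest ++ [c]).length : Int) - 1) res
          else solLoopA f sa (rest ++ [c]) (loc - 1) res

def solution (priorities : List Int) (location : Int) : Int :=
  solLoopA ((priorities.length + 1) * (priorities.length + 1))
    (PySem.List.sorted priorities (fun x => x) false) priorities location 0

-- ===== PORT B =====
-- B's 'while queue' loop over (index, priority) pairs, same generous fuel
def solLoopB (location : Int) (fuel : Nat) (qb : List (Int × Int)) (count : Int) : Int :=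
  match fuel with
  | 0 => count
  | f + 1 =>
    match qb with
    | [] => count
    | (idx, prio) :: rest =>
      if rest.any (fun e => prio < e.2) then
        solLoopB location f (rest ++ [(idx, prio)]) count
      else
        if idx = location then count + 1
        else solLoopB location f rest (count + 1)

def solution_alt (priorities : List Int) (location : Int) : Int :=
  solLoopB location ((priorities.length + 1) * (priorities.length + 1))
    (PySem.List.enumerate priorities 0) 0

-- ===== PRECONDITION & SPEC =====
-- Pre_ is the task's natural domain: location must index a process.  Outside it A raises
-- IndexError on many inputs and on others returns an accidental value of its wrap-around
-- pointer arithmetic; B returns the plain round-robin count there.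
def Pre_solution (priorities : List Int) (location : Int) : Prop :=
  priorities ≠ [] ∧ 0 ≤ location ∧ location < priorities.length
instance (priorities : List Int) (location : Int) : Decidable (Pre_solution priorities location) := by
  unfold Pre_solution; infer_instance
def pvWitness_solution : List Int × Int := ([2, 1, 3, 2], 2)

def Spec_solution (priorities : List Int) (location : Int) (out : Int) : Prop := out = solution_alt priorities location
instance (priorities : List Int) (location : Int) (out : Int) : Decidable (Spec_solution priorities location out) := by unfold Spec_solution; infer_instance

-- ===== CLAIM (what is proved, stated in full; the proofs are below) =====
def Claim_equal_solution : Prop := ∀ (priorities : List Int) (location : Int), Dom_solution priorities location → Pre_solution priorities location → Spec_solution priorities location (solution priorities location)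

-- ===== LEMMAS AND PROOFS =====

-- The bisimulation invariant between A's state (sa, q, loc, res) and B's state (qb, cnt):
-- sa is a sorted permutation of the queued priorities, qb carries the same priorities tagged
-- with their original indices, the counters agree, and loc is the position in qb of the
-- (unique) entry tagged 'location'.
def ProcInv (location : Int) (sa q : List Int) (loc res : Int)
    (qb : List (Int × Int)) (cnt : Int) : Prop :=
  sa.Pairwise (· ≤ ·) ∧ q.Perm sa ∧ qb.map Prod.snd = q ∧ res = cnt ∧
  ∃ ln : Nat, loc = (ln : Int) ∧ ln < qb.length ∧
    (∀ j : Nat, (h : j < qb.length) → (qb[j].1 = location ↔ j = ln))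

lemma pairwise_le_getLast (sa : List Int) (h : sa ≠ []) (hp : sa.Pairwise (· ≤ ·)) :
    ∀ x ∈ sa, x ≤ sa.getLast h := by
  intro x hx
  have hsplit : sa.dropLast ++ [sa.getLast h] = sa := List.dropLast_append_getLast h
  rw [← hsplit] at hp hx
  rcases List.mem_append.mp hx with hx | hx
  · exact (List.pairwise_append.mp hp).2.2 x hx _ (List.mem_singleton_self _)
  · simp only [List.mem_singleton] at hx; omega

-- index bookkeeping when the front entry is moved to the back
lemma rot_idx (location : Int) (e : Int × Int) (rest' : List (Int × Int)) (ln : Nat)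
    (hln : ln < rest'.length + 1)
    (hidx : ∀ j : Nat, (h : j < (e :: rest').length) → ((e :: rest')[j].1 = location ↔ j = ln)) :
    ∀ j : Nat, (h : j < (rest' ++ [e]).length) →
      ((rest' ++ [e])[j].1 = location ↔ j = (if ln = 0 then rest'.length else ln - 1)) := by
  intro j hj
  simp only [List.length_append, List.length_singleton] at hj
  by_cases hcase : j < rest'.length
  · rw [List.getElem_append_left hcase]
    have := hidx (j + 1) (by simp; omega)
    simp only [List.getElem_cons_succ] at this
    rw [this]
    split_ifs with h0 <;> omega
  · have hj' : j = rest'.length := by omega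
    subst hj'
    have hgl : (rest' ++ [e])[rest'.length] = e := by
      rw [List.getElem_append_right (by omega)]; simp
    rw [hgl]
    have := hidx 0 (by simp)
    simp only [List.getElem_cons_zero] at this
    rw [this]
    split_ifs with h0 <;> omega

-- index bookkeeping when the front entry is executed (and is not the tracked one)
lemma pop_idx (location : Int) (e : Int × Int) (rest' : List (Int × Int)) (ln : Nat)
    (hln0 : ln ≠ 0)
    (hidx : ∀ j : Nat, (h : j < (e :: rest').length) → ((e :: rest')[j].1 = location ↔ j = ln)) :
    ∀ j : Nat, (h : j < rest'.length) → (rest'[j].1 = location ↔ j = ln - 1) := by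
  intro j hj
  have := hidx (j + 1) (by simp; omega)
  simp only [List.getElem_cons_succ] at this
  rw [this]; omega

theorem loop_eq (location : Int) : ∀ (fuel : Nat) (sa q : List Int) (loc res : Int)
    (qb : List (Int × Int)) (cnt : Int), ProcInv location sa q loc res qb cnt →
    solLoopA fuel sa q loc res = solLoopB location fuel qb cnt := by
  intro fuel
  induction fuel with
  | zero => intro sa q loc res qb cnt hInv; exact hInv.2.2.2.1
  | succ f ih =>
    intro sa q loc res qb cnt hInv
    obtain ⟨hsort, hperm, hmap, hres, ln, hloc, hln, hidx⟩ := hInv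
    match qb with
    | [] => simp at hln
    | (i, p) :: rest' =>
      have hq : q = p :: rest'.map Prod.snd := by simpa using hmap.symm
      subst hq
      have hsane : sa ≠ [] := by
        intro h; subst h; exact absurd hperm.length_eq (by simp)
      have hlast : PySem.List.pyGet? sa (-1) = some (sa.getLast hsane) := by
        rw [PySem.List.pyGet?_neg_one, List.getLast?_eq_getLast_of_ne_nil hsane]
      -- the two front-is-max tests agree
      have hcond : (p = sa.getLast hsane) ↔ (rest'.any (fun e => p < e.2) = false) := by
        constructor
        · intro hmax
          simp only [List.any_eq_false, decide_eq_true_eq]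
          intro e he
          have hmem : e.2 ∈ p :: rest'.map Prod.snd := by
            simp only [List.mem_cons]; right; exact List.mem_map_of_mem he
          have := pairwise_le_getLast sa hsane hsort e.2 (hperm.mem_iff.mp hmem)
          omega
        · intro hno
          have hle : ∀ x ∈ p :: rest'.map Prod.snd, x ≤ p := by
            intro x hx
            rcases List.mem_cons.mp hx with hx | hx
            · omega
            · obtain ⟨e, he, hex⟩ := List.mem_map.mp hx
              have := (List.any_eq_false.mp hno) e he
              simp only [decide_eq_true_eq] at this; omega
          have h1 : sa.getLast hsane ≤ p :=
            hle _ (hperm.mem_iff.mpr (List.getLast_mem hsane))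
          have h2 : p ≤ sa.getLast hsane :=
            pairwise_le_getLast sa hsane hsort p (hperm.mem_iff.mp (by simp))
          omega
      simp only [solLoopA, solLoopB, hlast]
      by_cases hmax : p = sa.getLast hsane
      · rw [if_pos hmax, hcond.mp hmax]
        simp only [Bool.false_eq_true, if_false]
        have hfront : i = location ↔ 0 = ln := by
          have := hidx 0 (by simp)
          simpa using this
        by_cases hl0 : loc = 0
        · rw [if_pos hl0, if_pos (hfront.mpr (by omega))]; omega
        · rw [if_neg hl0, if_neg (fun h => hl0 (by have := hfront.mp h; omega))]
          -- executed a non-tracked process: sorted array and queue each lose one max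
          apply ih
          have hdl : sa = sa.dropLast ++ [p] := by
            rw [hmax]; exact (List.dropLast_append_getLast hsane).symm
          have hperm' : (rest'.map Prod.snd).Perm sa.dropLast := by
            have h1 : (p :: rest'.map Prod.snd).Perm (p :: sa.dropLast) := by
              rw [hdl] at hperm
              exact hperm.trans (List.perm_append_singleton p sa.dropLast)
            exact h1.cons_inv
          have hln0 : ln ≠ 0 := fun h => hl0 (by omega)
          refine ⟨hsort.sublist (List.dropLast_sublist sa), hperm', by simp, by omega,
            ln - 1, by omega, by simp at hln ⊢; omega,
            pop_idx location (i, p) rest' ln hln0 hidx⟩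
      · rw [if_neg hmax]
        have hany : rest'.any (fun e => p < e.2) = true := by
          cases h : rest'.any (fun e => p < e.2)
          · exact absurd (hcond.mpr h) hmax
          · rfl
        rw [hany]
        simp only [if_pos]
        have hperm' : ((rest'.map Prod.snd) ++ [p]).Perm sa :=
          (List.perm_append_singleton p _).trans hperm
        have hrot := rot_idx location (i, p) rest' ln (by simpa using hln) hidx
        by_cases hl0 : loc = 0
        · rw [if_pos hl0]
          apply ih
          have hln0 : ln = 0 := by omega
          refine ⟨hsort, hperm', by simp, hres, rest'.length, by simp,
            by simp, ?_⟩
          intro j hj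
          have := hrot j hj
          rw [this, if_pos hln0]
        · rw [if_neg hl0]
          apply ih
          have hln0 : ln ≠ 0 := fun h => hl0 (by omega)
          refine ⟨hsort, hperm', by simp, hres, ln - 1, by omega,
            by simp at hln ⊢; omega, ?_⟩
          intro j hj
          have := hrot j hj
          rw [this, if_neg hln0]

-- ===== VERDICT (by name: the statement is the Claim_ definition above) =====
theorem solution_spec : Claim_equal_solution := by
  intro priorities location _ hpre
  obtain ⟨hne, hge, hlt⟩ := hpre
  unfold Spec_solution solution solution_alt
  apply loop_eq
  refine ⟨?_, (PySem.List.sorted_perm priorities (fun x => x) false).symm,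
    PySem.List.map_snd_enumerate priorities 0, rfl,
    location.toNat, (Int.toNat_of_nonneg hge).symm, ?_, ?_⟩
  · have := PySem.List.sorted_pairwise priorities (fun x => x)
    simpa using this
  · rw [PySem.List.length_enumerate]; omega
  · intro j hj
    rw [PySem.List.length_enumerate] at hj
    rw [PySem.List.getElem_enumerate]
    simp only [Int.zero_add]
    omega
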